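-- pv_equiv track=rewrite | github.com/cosmologicon/grf | tests/dlx-profile.py | algox2_args
-- ===== SOURCE A (Python) =====
-- def algox2_args(subsets):
-- 	subsets = sorted(sorted(subset) for subset in subsets)
-- 	subsets = [set(subset) for subset in subsets]
-- 	nodes = sorted(set(node for subset in subsets for node in subset))
-- 	# containers[jnode] = the set of jsubsets that contain the given node
-- 	containers = [set(jsubset for jsubset, subset in enumerate(subsets) if node in subset) for node in nodes]
-- 	# overlappers[jsubset] = the set of jsubsets that overlap the given subset
-- 	overlappers = [set(ksubset for ksubset, s1 in enumerate(subsets) if s0 & s1) for s0 in subsets]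
-- 	jnodes, jsubsets = set(range(len(nodes))), set(range(len(subsets)))
-- 	return jnodes, jsubsets, subsets, containers, overlappers
-- ===== SOURCE B (Python) =====
-- def _merge(a, b):
-- 	"""Union of two strictly increasing int lists, as a strictly increasing list."""
-- 	out = []
-- 	i = j = 0
-- 	while i < len(a) and j < len(b):
-- 		if a[i] < b[j]:
-- 			out.append(a[i]); i += 1
-- 		elif b[j] < a[i]:
-- 			out.append(b[j]); j += 1
-- 		else:
-- 			out.append(a[i]); i += 1; j += 1
-- 	out.extend(a[i:])
-- 	out.extend(b[j:])
-- 	return out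
--
-- def algox2_args(subsets):
-- 	subsets = [set(s) for s in sorted(sorted(s) for s in subsets)]
-- 	# one indexing pass: index[node] = increasing list of the jsubsets containing node
-- 	index = {}
-- 	for j, s in enumerate(subsets):
-- 		for node in s:
-- 			index.setdefault(node, []).append(j)
-- 	nodes = sorted(index)
-- 	containers = [set(index[node]) for node in nodes]
-- 	# overlappers of a subset = k-way sorted merge of the index lists of its nodes
-- 	overlappers = []
-- 	for s in subsets:
-- 		acc = []
-- 		for node in s:
-- 			acc = _merge(acc, index[node])
-- 		overlappers.append(set(acc))
-- 	jnodes = set(range(len(nodes)))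
-- 	jsubsets = set(range(len(subsets)))
-- 	return jnodes, jsubsets, subsets, containers, overlappers
-- ===== Notes on version B (the rewrite author's own statement) =====
-- stated objective: alternative
-- what changed: A scans all subsets once per node (containers) and intersects every pair of subsets (overlappers); B builds a node->containing-indices list in one indexing pass and computes each subset's overlappers as a k-way two-pointer sorted merge of those index lists; asymptotically output-sensitive, but the pure-Python merge loop is not measurably faster than A's C-level set intersections.
import Mathlib
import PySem

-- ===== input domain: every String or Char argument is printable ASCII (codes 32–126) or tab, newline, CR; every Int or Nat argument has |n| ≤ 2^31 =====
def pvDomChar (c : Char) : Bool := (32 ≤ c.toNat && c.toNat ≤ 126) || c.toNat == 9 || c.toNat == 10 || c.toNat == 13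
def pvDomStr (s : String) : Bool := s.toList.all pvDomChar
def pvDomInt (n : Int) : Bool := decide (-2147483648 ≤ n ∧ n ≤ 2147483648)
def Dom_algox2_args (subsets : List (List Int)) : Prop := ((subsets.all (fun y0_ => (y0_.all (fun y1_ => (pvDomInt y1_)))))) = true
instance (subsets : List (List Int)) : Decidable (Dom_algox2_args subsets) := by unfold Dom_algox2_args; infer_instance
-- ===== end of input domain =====

-- B replaces A's two full enumerate-scans (containers: a scan of all subsets per node; overlappers:
-- a pairwise intersection test per pair of subsets) by one indexing pass building
-- node -> increasing list of containing subsets, overlappers then being k-way sorted merges of those lists.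

-- ===== PORT A =====
def algox2_args (subsets : List (List Int)) :
    List Int × List Int × List (List Int) × List (List Int) × List (List Int) :=
  -- subsets = sorted(sorted(subset) for subset in subsets)
  let subsets1 := PySem.List.sorted (subsets.map (fun subset => PySem.List.sorted subset (fun x => x))) (fun x => x)
  -- subsets = [set(subset) for subset in subsets]
  let subsets2 := subsets1.map (fun subset => PySem.Set.ofList subset)
  -- nodes = sorted(set(node for subset in subsets for node in subset))
  let nodes := PySem.List.sorted (PySem.Set.ofList (subsets2.flatMap (fun subset => subset))) (fun x => x)
  -- containers = [set(jsubset for jsubset, subset in enumerate(subsets) if node in subset) for node in nodes]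
  let containers := nodes.map (fun node =>
    PySem.Set.ofList (((PySem.List.enumerate subsets2).filter (fun p => p.2.contains node)).map (fun p => p.1)))
  -- overlappers = [set(ksubset for ksubset, s1 in enumerate(subsets) if s0 & s1) for s0 in subsets]
  let overlappers := subsets2.map (fun s0 =>
    PySem.Set.ofList (((PySem.List.enumerate subsets2).filter (fun p => !(PySem.Set.inter s0 p.2).isEmpty)).map (fun p => p.1)))
  -- jnodes, jsubsets = set(range(len(nodes))), set(range(len(subsets)))
  let jnodes := PySem.Set.ofList (PySem.List.pyRange 0 (PySem.List.len nodes))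
  let jsubsets := PySem.Set.ofList (PySem.List.pyRange 0 (PySem.List.len subsets2))
  (jnodes, jsubsets, subsets2, containers, overlappers)

-- ===== PORT B =====
-- _merge(a, b): the two-pointer while-loop over the two lists, as structural recursion on the pair
def pvMerge : List Int → List Int → List Int
  | [], b => b                                     -- i == len(a): out.extend(b[j:])
  | x :: a, [] => x :: pvMerge a []                -- j == len(b): out.extend(a[i:])
  | x :: a, y :: b =>
    if x < y then x :: pvMerge a (y :: b)
    else if y < x then y :: pvMerge (x :: a) b
    else x :: pvMerge a b

def algox2_args_alt (subsets : List (List Int)) :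
    List Int × List Int × List (List Int) × List (List Int) × List (List Int) :=
  -- subsets = [set(s) for s in sorted(sorted(s) for s in subsets)]
  let subsets2 := (PySem.List.sorted (subsets.map (fun s => PySem.List.sorted s (fun x => x))) (fun x => x)).map
    (fun s => PySem.Set.ofList s)
  -- index = {}; for j, s in enumerate(subsets): for node in s: index.setdefault(node, []).append(j)
  -- (setdefault(node, []).append(j) mutates the stored list: d[node] = d.get(node, []) + [j])
  let index : PySem.Dict Int (List Int) :=
    (PySem.List.enumerate subsets2).foldl (fun d p =>
      p.2.foldl (fun d node => d.insert node (d.getD node [] ++ [p.1])) d) PySem.Dict.empty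
  -- nodes = sorted(index)
  let nodes := PySem.List.sorted index.keys (fun x => x)
  -- containers = [set(index[node]) for node in nodes]
  let containers := nodes.map (fun node => PySem.Set.ofList (index.getD node []))
  -- for s in subsets: acc = []; for node in s: acc = _merge(acc, index[node]); overlappers.append(set(acc))
  let overlappers := subsets2.map (fun s =>
    PySem.Set.ofList (s.foldl (fun acc node => pvMerge acc (index.getD node [])) []))
  -- jnodes = set(range(len(nodes))); jsubsets = set(range(len(subsets)))
  let jnodes := PySem.Set.ofList (PySem.List.pyRange 0 (PySem.List.len nodes))
  let jsubsets := PySem.Set.ofList (PySem.List.pyRange 0 (PySem.List.len subsets2))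
  (jnodes, jsubsets, subsets2, containers, overlappers)

-- ===== PRECONDITION & SPEC =====
def Spec_algox2_args (subsets : List (List Int)) (out : List Int × List Int × List (List Int) × List (List Int) × List (List Int)) : Prop := out = algox2_args_alt subsets
instance (subsets : List (List Int)) (out : List Int × List Int × List (List Int) × List (List Int) × List (List Int)) : Decidable (Spec_algox2_args subsets out) := by unfold Spec_algox2_args; infer_instance

-- ===== CLAIM (what is proved, stated in full; the proofs are below) =====
def Claim_equal_algox2_args : Prop := ∀ (subsets : List (List Int)), Dom_algox2_args subsets → Spec_algox2_args subsets (algox2_args subsets)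

-- ===== LEMMAS AND PROOFS =====

-- inner fold of B's index pass: value at a key
theorem pvInnerGetD (s : List Int) (hs : s.Nodup) (j : Int) (d : PySem.Dict Int (List Int)) (node : Int) :
    (s.foldl (fun d node => d.insert node (d.getD node [] ++ [j])) d).getD node [] =
      if node ∈ s then d.getD node [] ++ [j] else d.getD node [] := by
  induction s generalizing d with
  | nil => simp
  | cons x rest ih =>
    simp only [List.foldl_cons]
    rw [ih hs.of_cons]
    by_cases hmem : node ∈ rest
    · have hne : node ≠ x := by rintro rfl; exact (List.nodup_cons.1 hs).1 hmem
      simp [hmem, hne, PySem.Dict.getD_insert]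
    · by_cases hx : node = x
      · subst hx
        simp [hmem]
      · simp [hmem, hx, PySem.Dict.getD_insert]

-- outer fold of B's index pass: value at a key
theorem pvOuterGetD (pairs : List (Int × List Int)) (hp : ∀ p ∈ pairs, p.2.Nodup)
    (d : PySem.Dict Int (List Int)) (node : Int) :
    (pairs.foldl (fun d p => p.2.foldl (fun d node => d.insert node (d.getD node [] ++ [p.1])) d) d).getD node [] =
      d.getD node [] ++ ((pairs.filter (fun p => decide (node ∈ p.2))).map (fun p => p.1)) := by
  induction pairs generalizing d with
  | nil => simp
  | cons p rest ih =>
    simp only [List.foldl_cons, List.filter_cons]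
    rw [ih (fun q hq => hp q (by simp [hq]))]
    rw [pvInnerGetD p.2 (hp p (by simp)) p.1 d node]
    by_cases hmem : node ∈ p.2 <;> simp [hmem]

-- keys of B's index, as a fold of set-updates
theorem pvOuterKeys (pairs : List (Int × List Int)) (d : PySem.Dict Int (List Int)) :
    (pairs.foldl (fun d p => p.2.foldl (fun d node => d.insert node (d.getD node [] ++ [p.1])) d) d).keys =
      pairs.foldl (fun ks p => PySem.Set.update ks p.2) d.keys := by
  induction pairs generalizing d with
  | nil => simp
  | cons p rest ih =>
    simp only [List.foldl_cons]
    rw [ih, PySem.Dict.keys_foldl_insert]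

theorem pvMemFoldlUpdate {β : Type} (l : List β) (g : β → List Int) (acc : PySem.Set Int) (x : Int) :
    x ∈ l.foldl (fun ks b => PySem.Set.update ks (g b)) acc ↔ x ∈ acc ∨ ∃ b ∈ l, x ∈ g b := by
  induction l generalizing acc with
  | nil => simp
  | cons b rest ih =>
    simp only [List.foldl_cons, ih, PySem.Set.mem_update]
    constructor
    · rintro ((h | h) | ⟨c, hc, hx⟩)
      · exact Or.inl h
      · exact Or.inr ⟨b, by simp, h⟩
      · exact Or.inr ⟨c, by simp [hc], hx⟩
    · rintro (h | ⟨c, hc, hx⟩)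
      · exact Or.inl (Or.inl h)
      · rcases List.mem_cons.1 hc with rfl | hc
        · exact Or.inl (Or.inr hx)
        · exact Or.inr ⟨c, hc, hx⟩

theorem pvNodupFoldlUpdate {β : Type} (l : List β) (g : β → List Int) (acc : PySem.Set Int)
    (h : acc.Nodup) : (l.foldl (fun ks b => PySem.Set.update ks (g b)) acc).Nodup := by
  induction l generalizing acc with
  | nil => simpa using h
  | cons b rest ih => exact ih _ (PySem.Set.nodup_update _ _ h)

theorem pvFilteredPairwise {α : Type} (xs : List α) (f : Int × α → Bool) :
    (((PySem.List.enumerate xs).filter f).map (fun p => p.1)).Pairwise (· < ·) := by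
  refine List.Pairwise.map _ (fun p q h => h) ?_
  exact (PySem.List.pairwise_lt_enumerate xs 0).sublist List.filter_sublist

theorem pvFilteredNodup {α : Type} (xs : List α) (f : Int × α → Bool) :
    (((PySem.List.enumerate xs).filter f).map (fun p => p.1)).Nodup :=
  (pvFilteredPairwise xs f).imp ne_of_lt

-- membership through enumerate
theorem pvExistsEnum {α : Type} (S : List α) (P : α → Prop) :
    (∃ p ∈ PySem.List.enumerate S, P p.2) ↔ ∃ s ∈ S, P s := by
  constructor
  · rintro ⟨p, hp, hP⟩
    rcases (PySem.List.mem_enumerate_iff S 0 p).1 hp with ⟨k, hk, rfl⟩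
    exact ⟨S[k], List.getElem_mem hk, hP⟩
  · rintro ⟨s, hs, hP⟩
    rcases List.mem_iff_getElem.1 hs with ⟨k, hk, rfl⟩
    exact ⟨(0 + (k : Int), S[k]), (PySem.List.mem_enumerate_iff S 0 _).2 ⟨k, hk, rfl⟩, hP⟩

-- B's index dictionary (abbreviates the double fold of the port, for the lemmas below)
def pvIndex (S : List (List Int)) : PySem.Dict Int (List Int) :=
  (PySem.List.enumerate S).foldl (fun d p =>
    p.2.foldl (fun d node => d.insert node (d.getD node [] ++ [p.1])) d) PySem.Dict.empty

theorem pvEnumNodup (S : List (List Int)) (hS : ∀ s ∈ S, s.Nodup) :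
    ∀ p ∈ PySem.List.enumerate S, p.2.Nodup := by
  intro p hp
  rcases (PySem.List.mem_enumerate_iff S 0 p).1 hp with ⟨k, hk, rfl⟩
  exact hS _ (List.getElem_mem hk)

theorem pvIndexGetD (S : List (List Int)) (hS : ∀ s ∈ S, s.Nodup) (node : Int) :
    (pvIndex S).getD node [] =
      ((PySem.List.enumerate S).filter (fun p => decide (node ∈ p.2))).map (fun p => p.1) := by
  rw [pvIndex, pvOuterGetD _ (pvEnumNodup S hS) _ node, PySem.Dict.getD_empty]
  simp

theorem pvMemKeys (S : List (List Int)) (node : Int) :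
    node ∈ (pvIndex S).keys ↔ ∃ s ∈ S, node ∈ s := by
  rw [pvIndex, pvOuterKeys, PySem.Dict.keys_empty]
  rw [pvMemFoldlUpdate (l := PySem.List.enumerate S) (g := fun p : Int × List Int => p.2) (acc := [])]
  simp [pvExistsEnum S (fun s => node ∈ s)]

theorem pvKeysNodup (S : List (List Int)) : ((pvIndex S).keys).Nodup := by
  rw [pvIndex, pvOuterKeys, PySem.Dict.keys_empty]
  exact pvNodupFoldlUpdate _ _ _ (by simp)

-- nodes coincide
theorem pvNodesEq (S : List (List Int)) :
    PySem.List.sorted (PySem.Set.ofList (S.flatMap (fun subset => subset))) (fun x => x) =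
      PySem.List.sorted (pvIndex S).keys (fun x => x) := by
  rw [PySem.List.sorted_id_eq_sorted_id_iff_perm]
  rw [List.perm_ext_iff_of_nodup (PySem.Set.nodup_ofList _) (pvKeysNodup S)]
  intro a
  rw [PySem.Set.mem_ofList, pvMemKeys, List.mem_flatMap]

-- containers coincide
theorem pvContainersEq (S : List (List Int)) (hS : ∀ s ∈ S, s.Nodup) (node : Int) :
    PySem.Set.ofList (((PySem.List.enumerate S).filter (fun p => p.2.contains node)).map (fun p => p.1)) =
      PySem.Set.ofList ((pvIndex S).getD node []) := by
  have hf : (fun p : Int × List Int => p.2.contains node) = (fun p => decide (node ∈ p.2)) := by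
    funext p; simp
  rw [pvIndexGetD S hS node, hf]

-- merge: membership (no sortedness needed)
theorem pvMergeMem (a b : List Int) (x : Int) : x ∈ pvMerge a b ↔ x ∈ a ∨ x ∈ b := by
  fun_induction pvMerge a b with
  | case1 b => simp
  | case2 y a ih => simp [ih]
  | case3 y a z b h ih => simp [ih]; tauto
  | case4 y a z b h1 h2 ih => simp [ih]; tauto
  | case5 y a z b h1 h2 ih =>
    have : y = z := by omega
    subst this
    simp [ih]; tauto

-- merge: strictly-increasing inputs give a strictly-increasing output
theorem pvMergePairwise (a b : List Int) (ha : a.Pairwise (· < ·)) (hb : b.Pairwise (· < ·)) :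
    (pvMerge a b).Pairwise (· < ·) := by
  fun_induction pvMerge a b with
  | case1 b => simpa using hb
  | case2 y a ih =>
    rw [List.pairwise_cons] at ha ⊢
    refine ⟨fun z hz => ?_, ih ha.2 hb⟩
    rw [pvMergeMem] at hz
    rcases hz with hz | hz
    · exact ha.1 z hz
    · simp at hz
  | case3 y a z b h ih =>
    rw [List.pairwise_cons] at ha ⊢
    refine ⟨fun w hw => ?_, ih ha.2 hb⟩
    rw [pvMergeMem] at hw
    rcases hw with hw | hw
    · exact ha.1 w hw
    · rcases List.mem_cons.1 hw with rfl | hw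
      · exact h
      · have := (List.pairwise_cons.1 hb).1 w hw; omega
  | case4 y a z b h1 h2 ih =>
    rw [List.pairwise_cons] at hb ⊢
    refine ⟨fun w hw => ?_, ih ha hb.2⟩
    rw [pvMergeMem] at hw
    rcases hw with hw | hw
    · rcases List.mem_cons.1 hw with rfl | hw
      · exact h2
      · have := (List.pairwise_cons.1 ha).1 w hw; omega
    · exact hb.1 w hw
  | case5 y a z b h1 h2 ih =>
    have hyz : y = z := by omega
    subst hyz
    rw [List.pairwise_cons] at ha hb ⊢
    refine ⟨fun w hw => ?_, ih ha.2 hb.2⟩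
    rw [pvMergeMem] at hw
    rcases hw with hw | hw
    · exact ha.1 w hw
    · exact hb.1 w hw

-- B's overlapper fold: strictly increasing, with union membership
theorem pvFoldMergePairwise (s : List Int) (g : Int → List Int)
    (hg : ∀ n, (g n).Pairwise (· < ·)) (acc : List Int) (hacc : acc.Pairwise (· < ·)) :
    (s.foldl (fun acc node => pvMerge acc (g node)) acc).Pairwise (· < ·) := by
  induction s generalizing acc with
  | nil => simpa using hacc
  | cons n rest ih => exact ih _ (pvMergePairwise _ _ hacc (hg n))

theorem pvFoldMergeMem (s : List Int) (g : Int → List Int) (acc : List Int) (x : Int) :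
    x ∈ s.foldl (fun acc node => pvMerge acc (g node)) acc ↔ x ∈ acc ∨ ∃ n ∈ s, x ∈ g n := by
  induction s generalizing acc with
  | nil => simp
  | cons n rest ih =>
    simp only [List.foldl_cons, ih, pvMergeMem]
    constructor
    · rintro ((h | h) | ⟨m, hm, hx⟩)
      · exact Or.inl h
      · exact Or.inr ⟨n, by simp, h⟩
      · exact Or.inr ⟨m, by simp [hm], hx⟩
    · rintro (h | ⟨m, hm, hx⟩)
      · exact Or.inl (Or.inl h)
      · rcases List.mem_cons.1 hm with rfl | hm
        · exact Or.inl (Or.inr hx)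
        · exact Or.inr ⟨m, hm, hx⟩

-- overlappers coincide: A's filtered enumerate list IS B's merge-fold
theorem pvOverlappersEq (S : List (List Int)) (hS : ∀ s ∈ S, s.Nodup) (s0 : List Int) :
    PySem.Set.ofList (((PySem.List.enumerate S).filter (fun p => !(PySem.Set.inter s0 p.2).isEmpty)).map (fun p => p.1)) =
    PySem.Set.ofList (s0.foldl (fun acc node => pvMerge acc ((pvIndex S).getD node [])) []) := by
  have hpair : ∀ n : Int, ((pvIndex S).getD n []).Pairwise (· < ·) := by
    intro n; rw [pvIndexGetD S hS]; exact pvFilteredPairwise S _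
  have hfoldpair := pvFoldMergePairwise s0 (fun n => (pvIndex S).getD n []) hpair [] (by simp)
  have hperm : (((PySem.List.enumerate S).filter (fun p => !(PySem.Set.inter s0 p.2).isEmpty)).map (fun p => p.1)).Perm
      (s0.foldl (fun acc node => pvMerge acc ((pvIndex S).getD node [])) []) := by
    rw [List.perm_ext_iff_of_nodup (pvFilteredNodup S _) (hfoldpair.imp ne_of_lt)]
    intro k
    rw [pvFoldMergeMem]
    simp only [List.not_mem_nil, false_or]
    constructor
    · rintro hk
      simp only [List.mem_map, List.mem_filter] at hk
      rcases hk with ⟨p, ⟨hp, hne⟩, rfl⟩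
      have : ∃ x, x ∈ PySem.Set.inter s0 p.2 := by
        rcases List.isEmpty_eq_false_iff_exists_mem.1 (by simpa using hne) with ⟨x, hx⟩
        exact ⟨x, hx⟩
      rcases this with ⟨x, hx⟩
      rw [PySem.Set.mem_inter] at hx
      refine ⟨x, hx.1, ?_⟩
      rw [pvIndexGetD S hS]
      simp only [List.mem_map, List.mem_filter]
      exact ⟨p, ⟨hp, by simpa using hx.2⟩, rfl⟩
    · rintro ⟨node, hnode, hk⟩
      rw [pvIndexGetD S hS] at hk
      simp only [List.mem_map, List.mem_filter] at hk
      rcases hk with ⟨p, ⟨hp, hmem⟩, rfl⟩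
      simp only [List.mem_map, List.mem_filter]
      refine ⟨p, ⟨hp, ?_⟩, rfl⟩
      have : node ∈ PySem.Set.inter s0 p.2 := (PySem.Set.mem_inter _ _ _).2 ⟨hnode, by simpa using hmem⟩
      have hne : (PySem.Set.inter s0 p.2).isEmpty = false := List.isEmpty_eq_false_iff_exists_mem.2 ⟨node, this⟩
      simp [hne]
  have h1 := PySem.List.sorted_eq_of_perm_of_pairwise_lt _ _ (fun x : Int => x) hperm (pvFilteredPairwise S _)
  have h2 := PySem.List.sorted_eq_of_perm_of_pairwise_lt _ _ (fun x : Int => x) (List.Perm.refl _) hfoldpair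
  rw [(h1.symm.trans h2 : _ = s0.foldl (fun acc node => pvMerge acc ((pvIndex S).getD node [])) [])]

-- ===== VERDICT (by name: the statement is the Claim_ definition above) =====
theorem algox2_args_spec : Claim_equal_algox2_args := by
  intro subsets _
  show algox2_args subsets = algox2_args_alt subsets
  unfold algox2_args algox2_args_alt
  simp only []
  rw [← pvIndex]
  have hS : ∀ s ∈ (PySem.List.sorted (subsets.map (fun subset => PySem.List.sorted subset (fun x => x))) (fun x => x)).map
      (fun subset => PySem.Set.ofList subset), s.Nodup := by
    intro s hs
    rcases List.mem_map.1 hs with ⟨t, -, rfl⟩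
    exact PySem.Set.nodup_ofList t
  rw [← pvNodesEq]
  simp only [Prod.mk.injEq]
  refine ⟨trivial, trivial, trivial, ?_, ?_⟩
  · exact List.map_congr_left (fun node _ => pvContainersEq _ hS node)
  · exact List.map_congr_left (fun s0 _ => pvOverlappersEq _ hS s0)
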